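-- pv_equiv track=rewrite | github.com/jeremyh/dea-proto | libs/stats/odc/stats/proc.py | _with_lookahead1
-- ===== SOURCE A (Python) =====
-- from typing import Iterable, Iterator, Callable, Optional, List, Set, Any, Tuple
--
-- def _with_lookahead1(it: Iterable[Any]) -> Iterator[Any]:
--     NOT_SET = object()
--     prev = NOT_SET
--     for x in it:
--         if prev is not NOT_SET:
--             yield prev
--         prev = x
--     if prev is not NOT_SET:
--         yield prev
-- ===== SOURCE B (Python) =====
-- def _with_lookahead1(it):
--     # A's lookahead buffer never drops an element: every element is yielded
--     # in order, so this is a plain pass-through generator.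
--     yield from it
-- ===== Notes on version B (the rewrite author's own statement) =====
-- stated objective: simpler
-- what changed: Replaced the sentinel/prev-buffer loop (branch, accumulator, tail yield) with a direct pass-through 'yield from it', since the buffer never drops an element.
import Mathlib
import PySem

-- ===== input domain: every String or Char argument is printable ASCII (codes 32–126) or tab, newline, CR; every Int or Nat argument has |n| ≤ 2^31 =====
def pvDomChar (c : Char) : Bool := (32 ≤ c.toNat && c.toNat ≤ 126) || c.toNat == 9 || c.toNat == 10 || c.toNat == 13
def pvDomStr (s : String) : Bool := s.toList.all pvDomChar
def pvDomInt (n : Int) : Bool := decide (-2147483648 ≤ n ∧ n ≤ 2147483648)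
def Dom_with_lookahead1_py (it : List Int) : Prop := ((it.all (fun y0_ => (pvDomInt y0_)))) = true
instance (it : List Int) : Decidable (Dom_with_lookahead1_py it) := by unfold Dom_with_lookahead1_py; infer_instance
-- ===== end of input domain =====

-- B replaces A's sentinel/one-element-buffer loop with a direct pass-through of the input (simpler).

-- ===== PORT A =====
-- prev : Option Int models 'prev' with the NOT_SET sentinel as none.
def with_lookahead1_loop (prev : Option Int) : List Int → List Int
  | [] => match prev with
          | none => []
          | some p => [p]
  | x :: xs => (match prev with
          | none => []
          | some p => [p]) ++ with_lookahead1_loop (some x) xs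

def with_lookahead1_py (it : List Int) : List Int :=
  with_lookahead1_loop none it

-- ===== PORT B =====
-- 'yield from it': the generator emits the input sequence unchanged.
def with_lookahead1_py_alt (it : List Int) : List Int := it

-- ===== PRECONDITION & SPEC =====
def Spec_with_lookahead1_py (it : List Int) (out : List Int) : Prop := out = with_lookahead1_py_alt it
instance (it : List Int) (out : List Int) : Decidable (Spec_with_lookahead1_py it out) := by unfold Spec_with_lookahead1_py; infer_instance

-- ===== CLAIM (what is proved, stated in full; the proofs are below) =====
def Claim_equal_with_lookahead1_py : Prop := ∀ (it : List Int), Dom_with_lookahead1_py it → Spec_with_lookahead1_py it (with_lookahead1_py it)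

-- ===== LEMMAS AND PROOFS =====
theorem with_lookahead1_loop_some (p : Int) (xs : List Int) :
    with_lookahead1_loop (some p) xs = p :: xs := by
  induction xs generalizing p with
  | nil => rfl
  | cons x xs ih => simp [with_lookahead1_loop, ih]

-- ===== VERDICT (by name: the statement is the Claim_ definition above) =====
theorem with_lookahead1_py_spec : Claim_equal_with_lookahead1_py := by
  intro it _
  unfold Spec_with_lookahead1_py with_lookahead1_py with_lookahead1_py_alt
  cases it with
  | nil => rfl
  | cons x xs => simp [with_lookahead1_loop, with_lookahead1_loop_some]
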